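-- pv_equiv track=rewrite | github.com/maximerenault/LPMS | utils/strings.py | check_strint
-- ===== SOURCE A (Python) =====
-- def check_strint(strin: str) -> str:
--     """Takes a string and removes characters that don't belong
--     in a signed integer.
--
--     >>> check_strint("")
--     ""
--     >>> check_strint("-")
--     "-"
--     >>> check_strint("-m080")
--     "-80"
--
--     Args:
--         strin (str): string supposed to be a signed integer
--
--     Returns:
--         str: processed string
--     """
--     strout = ""
--     leadingzeros = True
--     nbleadingzeros = 0
--     for i, c in enumerate(strin):
--         if i == 0 and c == "-":
--             strout += c
--         elif c.isdigit():
--             if c != "0":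
--                 leadingzeros = False
--             if not leadingzeros:
--                 strout += c
--             else:
--                 nbleadingzeros += 1
--
--     if leadingzeros and nbleadingzeros > 0:
--         strout += "0"
--     return strout
-- ===== SOURCE B (Python) =====
-- def check_strint(strin: str) -> str:
--     # Accumulate the numeric value of the digit characters, then let str()
--     # re-serialize it (which has no leading zeros, and gives "0" for zero).
--     n = None
--     for c in strin:
--         if c.isdigit():
--             n = (0 if n is None else n) * 10 + int(c)
--     sign = '-' if strin.startswith('-') else ''
--     return sign + ('' if n is None else str(n))
-- ===== Notes on version B (the rewrite author's own statement) =====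
-- stated objective: alternative
-- what changed: Instead of A's flag-driven character-copying pass with a leading-zero counter, B computes the integer VALUE of the digit characters in one arithmetic fold and re-serializes it with str(), which yields the zero-stripped digit string (and '0' for an all-zero digit string) by construction.
import Mathlib
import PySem

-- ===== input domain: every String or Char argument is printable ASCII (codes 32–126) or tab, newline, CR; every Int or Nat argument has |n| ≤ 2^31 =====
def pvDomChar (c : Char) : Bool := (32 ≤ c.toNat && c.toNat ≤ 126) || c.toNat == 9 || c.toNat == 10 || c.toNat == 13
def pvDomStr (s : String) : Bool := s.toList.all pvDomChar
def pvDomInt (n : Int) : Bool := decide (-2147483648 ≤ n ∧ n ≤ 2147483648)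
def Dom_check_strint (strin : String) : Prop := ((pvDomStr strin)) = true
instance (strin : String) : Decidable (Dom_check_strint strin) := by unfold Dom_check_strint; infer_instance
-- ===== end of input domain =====

-- B is a different algorithm: it accumulates the digits' numeric value and re-serializes it
-- with str(), instead of A's flag-driven character-copying pass with a leading-zero counter.

-- ===== PORT A =====
-- one loop step of A's `for i, c in enumerate(strin)` body; state = (strout, leadingzeros, nbleadingzeros)
def pvStepA (st : List Char × Bool × Nat) (ic : Int × Char) : List Char × Bool × Nat :=
  match st, ic with
  | (out, lz, nb), (i, c) =>
    if i == 0 && c == '-' then (out ++ [c], lz, nb)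
    else if PySem.Chars.isdigit c then
      let lz' := if c != '0' then false else lz
      if !lz' then (out ++ [c], lz', nb) else (out, lz', nb + 1)
    else (out, lz, nb)

def check_strint (strin : String) : String :=
  let r := (PySem.List.enumerate strin.toList).foldl pvStepA ([], true, 0)
  let out := if r.2.1 && decide (0 < r.2.2) then r.1 ++ ['0'] else r.1
  String.ofList out

-- ===== PORT B =====
-- one loop step of Source B's `for c in strin` body; `int(c)` ported by hand as ord(c) - 48,
-- which is exact for the digit characters admitted by the isdigit guard
def pvStepB (n : Option Int) (c : Char) : Option Int :=
  if PySem.Chars.isdigit c then some ((n.getD 0) * 10 + ((c.toNat : Int) - 48)) else n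

def check_strint_alt (strin : String) : String :=
  let cs := strin.toList
  let n := cs.foldl pvStepB none
  let sign : List Char := if PySem.Chars.startswith cs ['-'] then ['-'] else []
  String.ofList (sign ++ (match n with | none => [] | some v => PySem.Int.toChars v))

-- ===== PRECONDITION & SPEC =====
def Spec_check_strint (strin : String) (out : String) : Prop := out = check_strint_alt strin
instance (strin : String) (out : String) : Decidable (Spec_check_strint strin out) := by unfold Spec_check_strint; infer_instance

-- ===== CLAIM (what is proved, stated in full; the proofs are below) =====
def Claim_equal_check_strint : Prop := ∀ (strin : String), Dom_check_strint strin → Spec_check_strint strin (check_strint strin)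

-- ===== LEMMAS AND PROOFS =====

-- both sides reduce to this normal form: sign ++ (digits with leading zeros stripped, '0' kept if all-zero)
def pvNorm (ds : List Char) : List Char :=
  if ds.dropWhile (· == '0') = [] ∧ ds ≠ [] then ['0'] else ds.dropWhile (· == '0')

-- value of a digit string, natural-number accumulator
def pvVal (a : Nat) (ds : List Char) : Nat := ds.foldl (fun a c => 10 * a + (c.toNat - 48)) a

-- ---- generic character facts ----

theorem pvCharEq (c d : Char) (h : c.toNat = d.toNat) : c = d := by
  apply Char.ext; exact UInt32.toNat_inj.mp h

theorem pvDigitBounds (c : Char) (h : PySem.Chars.isdigit c = true) :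
    48 ≤ c.toNat ∧ c.toNat ≤ 57 := by
  simp [PySem.Chars.isdigit, Char.le_def] at h
  exact ⟨h.1, h.2⟩

theorem pvDigitChar (c : Char) (h : PySem.Chars.isdigit c = true) :
    Nat.digitChar (c.toNat - 48) = c := by
  obtain ⟨h1, h2⟩ := pvDigitBounds c h
  set n := c.toNat with hn
  have hv : Nat.isValidChar n := Or.inl (by omega)
  have hc : c = Char.ofNat n := by
    apply pvCharEq; rw [Char.toNat_ofNat, if_pos hv]
  interval_cases n <;> (rw [hc]; rfl)

theorem pvDigitZero (c : Char) (h : PySem.Chars.isdigit c = true) :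
    c.toNat - 48 = 0 ↔ c = '0' := by
  obtain ⟨h1, _⟩ := pvDigitBounds c h
  constructor
  · intro hz; apply pvCharEq; show c.toNat = 48; omega
  · intro he; subst he; rfl

-- ---- A's loop (index dropped after position 0) ----

def pvStep (st : List Char × Bool × Nat) (c : Char) : List Char × Bool × Nat :=
  match st with
  | (out, lz, nb) =>
    if PySem.Chars.isdigit c then
      let lz' := if c != '0' then false else lz
      if !lz' then (out ++ [c], lz', nb) else (out, lz', nb + 1)
    else (out, lz, nb)

theorem pvFoldA_eq_pvFold (cs : List Char) (s : Int) (hs : 1 ≤ s) (st : List Char × Bool × Nat) :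
    (PySem.List.enumerate cs s).foldl pvStepA st = cs.foldl pvStep st := by
  induction cs generalizing s st with
  | nil => simp [PySem.List.enumerate_nil]
  | cons c cs ih =>
    rw [PySem.List.enumerate_cons]
    simp only [List.foldl_cons]
    have hne : (s == (0 : Int)) = false := by simp; omega
    have : pvStepA st (s, c) = pvStep st c := by
      obtain ⟨out, lz, nb⟩ := st
      simp [pvStepA, pvStep, hne]
    rw [this, ih _ (by omega)]

theorem pvFold_false (cs : List Char) (out : List Char) (nb : Nat) :
    cs.foldl pvStep (out, false, nb) = (out ++ cs.filter PySem.Chars.isdigit, false, nb) := by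
  induction cs generalizing out with
  | nil => simp
  | cons c cs ih =>
    by_cases hd : PySem.Chars.isdigit c
    · simp [pvStep, hd, ih]
    · simp [pvStep, hd, ih]

theorem pvFold_true (cs : List Char) (out : List Char) (nb : Nat) :
    cs.foldl pvStep (out, true, nb) =
      (out ++ (cs.filter PySem.Chars.isdigit).dropWhile (· == '0'),
       decide ((cs.filter PySem.Chars.isdigit).dropWhile (· == '0') = []),
       nb + ((cs.filter PySem.Chars.isdigit).length -
             ((cs.filter PySem.Chars.isdigit).dropWhile (· == '0')).length)) := by
  induction cs generalizing out nb with
  | nil => simp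
  | cons c cs ih =>
    by_cases hd : PySem.Chars.isdigit c
    · by_cases hz : c = '0'
      · subst hz
        have hlen := List.length_dropWhile_le (fun c => c == '0') (cs.filter PySem.Chars.isdigit)
        simp only [List.foldl_cons, pvStep, hd, List.filter_cons]
        simp only [ite_true]
        simp only [bne_self_eq_false, Bool.false_eq_true, if_false, Bool.not_true]
        rw [ih]
        simp only [List.dropWhile_cons, beq_self_eq_true, ite_true, List.length_cons,
          Prod.mk.injEq]
        refine ⟨trivial, trivial, ?_⟩
        omega
      · have hbne : (c != '0') = true := by simp [hz]
        simp only [List.foldl_cons, pvStep, hd, List.filter_cons, ite_true, hbne,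
          Bool.not_false]
        rw [pvFold_false]
        have hdw : (c :: cs.filter PySem.Chars.isdigit).dropWhile (· == '0')
            = c :: cs.filter PySem.Chars.isdigit := by
          rw [List.dropWhile_cons_of_neg]; simp [hz]
        simp [hdw]
    · simp [pvStep, hd, ih]

-- A's end-state fix-up equals pvNorm
theorem pvFinal (pre ds : List Char) :
    String.ofList (if (decide (ds.dropWhile (· == '0') = []) &&
         decide (0 < ds.length - (ds.dropWhile (· == '0')).length)) = true
     then pre ++ ds.dropWhile (· == '0') ++ ['0'] else pre ++ ds.dropWhile (· == '0'))
    = String.ofList (pre ++ pvNorm ds) := by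
  unfold pvNorm
  have hlen := List.length_dropWhile_le (fun c => c == '0') ds
  by_cases h : ds.dropWhile (· == '0') = []
  · by_cases he : ds = []
    · subst he; simp at h ⊢
    · have hpos : 0 < ds.length := List.length_pos_of_ne_nil he
      have hc : 0 < ds.length - (ds.dropWhile (· == '0')).length := by
        rw [h]; simpa using hpos
      simp [h, he, hpos]
  · have hc : ¬ (ds.dropWhile (· == '0') = [] ∧ ds ≠ []) := fun ⟨h1, _⟩ => h h1
    simp [h]

-- A reduces to sign ++ pvNorm (digit filter)
theorem pvSideA (strin : String) :
    check_strint strin =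
      String.ofList ((if PySem.Chars.startswith strin.toList ['-'] then ['-'] else []) ++
        pvNorm (strin.toList.filter PySem.Chars.isdigit)) := by
  unfold check_strint
  dsimp only
  cases hcs : strin.toList with
  | nil => simp [PySem.List.enumerate_nil, PySem.Chars.startswith, pvNorm]
  | cons c rest =>
    rw [PySem.List.enumerate_cons, List.foldl_cons]
    by_cases hm : c = '-'
    · subst hm
      have h0 : pvStepA ([], true, 0) ((0 : Int), '-') = (['-'], true, 0) := by
        simp [pvStepA]
      rw [h0, pvFoldA_eq_pvFold _ _ (by omega), pvFold_true]
      have hsw : PySem.Chars.startswith ('-' :: rest) ['-'] = true := by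
        simp [PySem.Chars.startswith]
      have hf : ('-' :: rest).filter PySem.Chars.isdigit = rest.filter PySem.Chars.isdigit := by
        rw [List.filter_cons_of_neg]; decide
      simp only [hsw, if_pos, hf, Nat.zero_add, List.append_assoc]
      exact pvFinal ['-'] (rest.filter PySem.Chars.isdigit)
    · have h0 : pvStepA ([], true, 0) ((0 : Int), c) = pvStep ([], true, 0) c := by
        simp [pvStepA, pvStep, hm]
      rw [h0, pvFoldA_eq_pvFold _ _ (by omega)]
      have hrest : rest.foldl pvStep (pvStep ([], true, 0) c)
          = (c :: rest).foldl pvStep ([], true, 0) := by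
        simp [List.foldl_cons]
      rw [hrest, pvFold_true]
      have hsw : PySem.Chars.startswith (c :: rest) ['-'] = false := by
        simp [PySem.Chars.startswith, List.isPrefixOf]
        intro h; exact absurd h.symm hm
      simp only [hsw, Bool.false_eq_true, if_false, List.nil_append, Nat.zero_add]
      have := pvFinal [] ((c :: rest).filter PySem.Chars.isdigit)
      simpa using this

-- ---- B's loop ----

theorem pvFoldB_filter (cs : List Char) (acc : Option Int) :
    cs.foldl pvStepB acc = (cs.filter PySem.Chars.isdigit).foldl pvStepB acc := by
  induction cs generalizing acc with
  | nil => rfl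
  | cons c cs ih =>
    by_cases hd : PySem.Chars.isdigit c
    · simp [hd, ih]
    · simp [hd, pvStepB, ih]

theorem pvFoldB_some (ds : List Char) (hall : ∀ c ∈ ds, PySem.Chars.isdigit c = true)
    (a : Nat) : ds.foldl pvStepB (some (a : Int)) = some ((pvVal a ds : Nat) : Int) := by
  induction ds generalizing a with
  | nil => rfl
  | cons c rest ih =>
    have hd := hall c (by simp)
    have hb := (pvDigitBounds c hd).1
    have hstep : pvStepB (some (a : Int)) c = some ((10 * a + (c.toNat - 48) : Nat) : Int) := by
      simp [pvStepB, hd]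
      push_cast [Nat.cast_sub hb]
      ring
    rw [List.foldl_cons, hstep, ih (fun c hc => hall c (by simp [hc]))]
    simp [pvVal]

theorem pvFoldB_none (ds : List Char) (hall : ∀ c ∈ ds, PySem.Chars.isdigit c = true) :
    ds.foldl pvStepB none =
      (if ds = [] then none else some ((pvVal 0 ds : Nat) : Int)) := by
  cases ds with
  | nil => rfl
  | cons c rest =>
    have hd := hall c (by simp)
    have hb := (pvDigitBounds c hd).1
    have hstep : pvStepB none c = some (((c.toNat - 48 : Nat) : Nat) : Int) := by
      simp [pvStepB, hd]
      push_cast [Nat.cast_sub hb]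
      ring
    rw [List.foldl_cons, hstep, pvFoldB_some rest (fun c hc => hall c (by simp [hc]))]
    simp [pvVal]

-- ---- value = 0 iff all digits are '0' ----

theorem pvVal_zero (ds : List Char) (hall : ∀ c ∈ ds, PySem.Chars.isdigit c = true) (a : Nat) :
    pvVal a ds = 0 ↔ a = 0 ∧ ∀ c ∈ ds, c = '0' := by
  induction ds generalizing a with
  | nil => simp [pvVal]
  | cons c rest ih =>
    have hd := hall c (by simp)
    have hz := pvDigitZero c hd
    have : pvVal a (c :: rest) = pvVal (10 * a + (c.toNat - 48)) rest := by
      simp [pvVal]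
    rw [this, ih (fun c hc => hall c (by simp [hc]))]
    constructor
    · rintro ⟨h1, h2⟩
      have ha : a = 0 := by omega
      have hc0 : c.toNat - 48 = 0 := by omega
      exact ⟨ha, by simpa [hz.mp hc0] using h2⟩
    · rintro ⟨ha, h2⟩
      have hc0 : c.toNat - 48 = 0 := hz.mpr (h2 c (by simp))
      exact ⟨by omega, fun x hx => h2 x (by simp [hx])⟩

-- ---- Nat.toDigits machinery ----

theorem pvCore_fuel (fuel1 : Nat) : ∀ (fuel2 n : Nat) (ds : List Char),
    n < fuel1 → n < fuel2 →
    Nat.toDigitsCore 10 fuel1 n ds = Nat.toDigitsCore 10 fuel2 n ds := by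
  induction fuel1 with
  | zero => intro _ n _ h _; omega
  | succ f1 ih =>
    intro fuel2 n ds h1 h2
    cases fuel2 with
    | zero => omega
    | succ f2 =>
      simp only [Nat.toDigitsCore]
      by_cases hz : n / 10 = 0
      · simp [hz]
      · simp only [hz, if_false]
        have hlt : n / 10 < n := Nat.div_lt_self (by omega) (by omega)
        exact ih f2 (n / 10) _ (by omega) (by omega)

theorem pvCore_append (fuel : Nat) : ∀ (n : Nat) (ds : List Char), n < fuel →
    Nat.toDigitsCore 10 fuel n ds = Nat.toDigitsCore 10 fuel n [] ++ ds := by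
  induction fuel with
  | zero => intro n _ h; omega
  | succ f ih =>
    intro n ds h
    simp only [Nat.toDigitsCore]
    by_cases hz : n / 10 = 0
    · simp [hz]
    · simp only [hz, if_false]
      have hlt : n / 10 < n := Nat.div_lt_self (by omega) (by omega)
      have hf : n / 10 < f := by omega
      rw [ih (n / 10) _ hf, ih (n / 10) [Nat.digitChar (n % 10)] hf, List.append_assoc]
      rfl

theorem pvToDigits_step (v d : Nat) (hd : d < 10) :
    Nat.toDigits 10 (10 * v + d) =
      (if v = 0 then [] else Nat.toDigits 10 v) ++ [Nat.digitChar d] := by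
  have hmod : (10 * v + d) % 10 = d := by omega
  have hdiv : (10 * v + d) / 10 = v := by omega
  show Nat.toDigitsCore 10 (10 * v + d + 1) (10 * v + d) [] = _
  simp only [Nat.toDigitsCore, hmod, hdiv]
  by_cases hv : v = 0
  · simp [hv]
  · simp only [hv, if_false]
    rw [pvCore_fuel (10 * v + d) (v + 1) v [Nat.digitChar d] (by omega) (by omega),
        pvCore_append (v + 1) v [Nat.digitChar d] (by omega)]
    rfl

-- the decimal rendering of a digit string's value is its zero-stripped form
theorem pvToDigits_val (ds : List Char) (hall : ∀ c ∈ ds, PySem.Chars.isdigit c = true)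
    (hne : ds ≠ []) :
    Nat.toDigits 10 (pvVal 0 ds) =
      (if ds.dropWhile (· == '0') = [] then ['0'] else ds.dropWhile (· == '0')) := by
  induction ds using List.reverseRecOn with
  | nil => exact absurd rfl hne
  | append_singleton es c ih =>
    have hd : PySem.Chars.isdigit c = true := hall c (by simp)
    have hbd := pvDigitBounds c hd
    have hval : pvVal 0 (es ++ [c]) = 10 * pvVal 0 es + (c.toNat - 48) := by
      simp [pvVal, List.foldl_append]
    have hallE : ∀ x ∈ es, PySem.Chars.isdigit x = true :=
      fun x hx => hall x (by simp [hx])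
    have hdchar := pvDigitChar c hd
    rw [hval, pvToDigits_step _ _ (by omega), hdchar]
    have hsingle : (if ([c] : List Char).dropWhile (· == '0') = []
        then (['0'] : List Char) else [c].dropWhile (· == '0')) = [c] := by
      by_cases hc0 : c = '0'
      · subst hc0; simp
      · simp [hc0]
    by_cases hz : pvVal 0 es = 0
    · have hzero : ∀ x ∈ es, x = '0' := ((pvVal_zero es hallE 0).mp hz).2
      have hdw : es.dropWhile (· == '0') = [] := by
        rw [List.dropWhile_eq_nil_iff]
        intro x hx; simp [hzero x hx]
      rw [if_pos hz, List.dropWhile_append, hdw]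
      simpa using hsingle.symm
    · have hdw : es.dropWhile (· == '0') ≠ [] := by
        intro h
        apply hz
        rw [pvVal_zero es hallE 0]
        refine ⟨rfl, fun x hx => ?_⟩
        have := List.dropWhile_eq_nil_iff.mp h x hx
        simpa using this
      have hesne : es ≠ [] := by
        intro h; subst h; exact hdw rfl
      rw [if_neg hz, List.dropWhile_append]
      have hie : (es.dropWhile (· == '0')).isEmpty = false := by
        simpa [List.isEmpty_iff] using hdw
      rw [hie, ih hallE hesne]
      simp [hdw]

-- toChars of a natural-number cast
theorem pvToChars_cast (n : Nat) : PySem.Int.toChars ((n : Nat) : Int) = Nat.toDigits 10 n := by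
  simp [PySem.Int.toChars]

-- B reduces to sign ++ pvNorm (digit filter)
theorem pvSideB (strin : String) :
    check_strint_alt strin =
      String.ofList ((if PySem.Chars.startswith strin.toList ['-'] then ['-'] else []) ++
        pvNorm (strin.toList.filter PySem.Chars.isdigit)) := by
  unfold check_strint_alt
  dsimp only
  set ds := strin.toList.filter PySem.Chars.isdigit with hds
  have hall : ∀ c ∈ ds, PySem.Chars.isdigit c = true := by
    intro c hc; exact List.of_mem_filter hc
  rw [pvFoldB_filter, ← hds, pvFoldB_none ds hall]
  by_cases hne : ds = []
  · simp [hne, pvNorm]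
  · simp only [hne, if_false]
    rw [pvToChars_cast, pvToDigits_val ds hall hne]
    unfold pvNorm
    simp [hne]

theorem pvMain (strin : String) : check_strint strin = check_strint_alt strin := by
  rw [pvSideA, pvSideB]

-- ===== VERDICT (by name: the statement is the Claim_ definition above) =====
theorem check_strint_spec : Claim_equal_check_strint := by
  intro strin _
  unfold Spec_check_strint
  exact pvMain strin
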